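-- pv_equiv track=rewrite | github.com/actions-marketplace-validations/0xToxSec_slopcheck | slopcheck/detect.py | _check_hallucination_pattern
-- ===== SOURCE A (Python) =====
-- from typing import List, Optional
--
-- HALLUCINATION_PREFIXES = [
--     "easy-", "simple-", "quick-", "fast-", "auto-", "smart-",
--     "py-", "python-", "node-", "go-", "rust-",
--     "ai-", "gpt-", "llm-", "ml-", "openai-", "langchain-",
-- ]
--
-- HALLUCINATION_SUFFIXES = [
--     "-helper", "-helpers", "-utils", "-util", "-tools", "-tool",
--     "-wrapper", "-client", "-sdk", "-api", "-lib",
--     "-ai", "-gpt", "-llm", "-ml", "-openai",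
--     "-easy", "-simple", "-fast", "-plus", "-pro", "-lite",
--     "-extra", "-extended", "-enhanced", "-advanced",
-- ]
--
-- def _check_hallucination_pattern(name: str) -> Optional[str]:
--     """Does this name smell like LLM output?"""
--     lower = name.lower()
--     for prefix in HALLUCINATION_PREFIXES:
--         if lower.startswith(prefix):
--             remainder = lower[len(prefix):]
--             if remainder and len(remainder) > 2:
--                 return f"Name starts with '{prefix}' -- classic LLM naming pattern"
--     for suffix in HALLUCINATION_SUFFIXES:
--         if lower.endswith(suffix):
--             remainder = lower[:-len(suffix)]
--             if remainder and len(remainder) > 2: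
--                 return f"Name ends with '{suffix}' -- classic LLM naming pattern"
--     return None
-- ===== SOURCE B (Python) =====
-- from typing import Optional
--
-- HALLUCINATION_PREFIXES = frozenset([
--     "easy-", "simple-", "quick-", "fast-", "auto-", "smart-",
--     "py-", "python-", "node-", "go-", "rust-",
--     "ai-", "gpt-", "llm-", "ml-", "openai-", "langchain-",
-- ])
--
-- HALLUCINATION_SUFFIXES = frozenset([
--     "-helper", "-helpers", "-utils", "-util", "-tools", "-tool",
--     "-wrapper", "-client", "-sdk", "-api", "-lib",
--     "-ai", "-gpt", "-llm", "-ml", "-openai",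
--     "-easy", "-simple", "-fast", "-plus", "-pro", "-lite",
--     "-extra", "-extended", "-enhanced", "-advanced",
-- ])
--
-- def _check_hallucination_pattern(name: str) -> Optional[str]:
--     """Does this name smell like LLM output?"""
--     lower = name.lower()
--     i = lower.find("-")
--     if i == -1:
--         return None
--     prefix = lower[:i + 1]
--     if prefix in HALLUCINATION_PREFIXES and len(lower) - (i + 1) > 2:
--         return f"Name starts with '{prefix}' -- classic LLM naming pattern"
--     j = lower.rfind("-")
--     suffix = lower[j:]
--     if suffix in HALLUCINATION_SUFFIXES and j > 2:
--         return f"Name ends with '{suffix}' -- classic LLM naming pattern"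
--     return None
-- ===== Notes on version B (the rewrite author's own statement) =====
-- stated objective: idiomatic
-- what changed: Replaced the two linear scans over the affix constant lists with frozenset lookups of a candidate affix computed directly from the name's first and last dash positions (str.find/str.rfind), exploiting that every pattern is dash-terminated/dash-initiated so at most one can match.
import Mathlib
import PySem

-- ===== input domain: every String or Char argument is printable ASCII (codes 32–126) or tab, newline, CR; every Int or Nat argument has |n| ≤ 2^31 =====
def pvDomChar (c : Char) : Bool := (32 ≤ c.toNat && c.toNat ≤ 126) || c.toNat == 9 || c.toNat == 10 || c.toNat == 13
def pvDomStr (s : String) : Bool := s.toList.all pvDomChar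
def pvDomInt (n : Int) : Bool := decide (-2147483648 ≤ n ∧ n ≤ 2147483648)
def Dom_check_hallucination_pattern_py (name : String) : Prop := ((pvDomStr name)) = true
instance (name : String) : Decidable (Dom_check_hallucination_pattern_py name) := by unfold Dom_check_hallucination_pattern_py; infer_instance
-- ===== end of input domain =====

-- ===== PORT A =====
-- B reorganises the same check around computed dash positions (find/rfind + set lookup) instead of scanning the two affix lists; objective: idiomatic, no speed claim.
def pyHalPrefixes : List String :=
  ["easy-", "simple-", "quick-", "fast-", "auto-", "smart-",
   "py-", "python-", "node-", "go-", "rust-",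
   "ai-", "gpt-", "llm-", "ml-", "openai-", "langchain-"]

def pyHalSuffixes : List String :=
  ["-helper", "-helpers", "-utils", "-util", "-tools", "-tool",
   "-wrapper", "-client", "-sdk", "-api", "-lib",
   "-ai", "-gpt", "-llm", "-ml", "-openai",
   "-easy", "-simple", "-fast", "-plus", "-pro", "-lite",
   "-extra", "-extended", "-enhanced", "-advanced"]

-- f"Name starts with '{p}' -- classic LLM naming pattern" (shared message formatter)
def pyStartMsg (p : List Char) : String :=
  String.ofList ("Name starts with '".toList ++ p ++ "' -- classic LLM naming pattern".toList)

def pyEndMsg (s : List Char) : String :=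
  String.ofList ("Name ends with '".toList ++ s ++ "' -- classic LLM naming pattern".toList)

-- the 'for prefix in HALLUCINATION_PREFIXES' loop with its early return
def aPrefixLoop (lower : List Char) : List String → Option String
  | [] => none
  | p :: ps =>
    if PySem.Chars.startswith lower p.toList then
      let remainder := PySem.Chars.slice lower (some (p.toList.length : Int)) none
      if remainder ≠ [] ∧ 2 < remainder.length then some (pyStartMsg p.toList)
      else aPrefixLoop lower ps
    else aPrefixLoop lower ps

-- the 'for suffix in HALLUCINATION_SUFFIXES' loop with its early return
def aSuffixLoop (lower : List Char) : List String → Option String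
  | [] => none
  | s :: ss =>
    if PySem.Chars.endswith lower s.toList then
      let remainder := PySem.Chars.slice lower none (some (-(s.toList.length : Int)))
      if remainder ≠ [] ∧ 2 < remainder.length then some (pyEndMsg s.toList)
      else aSuffixLoop lower ss
    else aSuffixLoop lower ss

def check_hallucination_pattern_py (name : String) : Option String :=
  let lower := PySem.Chars.lower name.toList
  match aPrefixLoop lower pyHalPrefixes with
  | some m => some m
  | none => aSuffixLoop lower pyHalSuffixes

-- ===== PORT B =====
-- B's frozensets of affixes
def pyHalPrefixSet : PySem.Set (List Char) := PySem.Set.ofList (pyHalPrefixes.map String.toList)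
def pyHalSuffixSet : PySem.Set (List Char) := PySem.Set.ofList (pyHalSuffixes.map String.toList)

def check_hallucination_pattern_py_alt (name : String) : Option String :=
  let lower := PySem.Chars.lower name.toList
  let i := PySem.Chars.find lower ['-']
  if i = -1 then none
  else
    let pre := PySem.Chars.slice lower none (some (i + 1))
    if PySem.Set.contains pyHalPrefixSet pre ∧ 2 < (lower.length : Int) - (i + 1) then
      some (pyStartMsg pre)
    else
      let j := PySem.Chars.rfind lower ['-']
      let suf := PySem.Chars.slice lower (some j) none
      if PySem.Set.contains pyHalSuffixSet suf ∧ 2 < j then some (pyEndMsg suf)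
      else none

-- ===== PRECONDITION & SPEC =====
def Spec_check_hallucination_pattern_py (name : String) (out : Option String) : Prop := out = check_hallucination_pattern_py_alt name
instance (name : String) (out : Option String) : Decidable (Spec_check_hallucination_pattern_py name out) := by unfold Spec_check_hallucination_pattern_py; infer_instance

-- ===== CLAIM (what is proved, stated in full; the proofs are below) =====
def Claim_equal_check_hallucination_pattern_py : Prop := ∀ (name : String), Dom_check_hallucination_pattern_py name → Spec_check_hallucination_pattern_py name (check_hallucination_pattern_py name)

-- ===== LEMMAS AND PROOFS =====

-- a dash-terminated, otherwise dash-free pattern is a prefix of t ++ '-' :: rest (first dash after t) iff it is exactly t ++ ['-']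
lemma dash_prefix_iff (q t rest : List Char) (hq : '-' ∉ q) (ht : '-' ∉ t) :
    ((q ++ ['-']) <+: (t ++ '-' :: rest)) ↔ q = t := by
  induction q generalizing t with
  | nil =>
    cases t with
    | nil => simp
    | cons c t' =>
      have hc : ('-' : Char) ≠ c := fun he => ht (by simp [← he])
      simp [List.cons_prefix_cons, hc]
  | cons a q' ih =>
    have ha : a ≠ '-' := fun he => hq (by simp [he])
    have hq' : '-' ∉ q' := fun he => hq (List.mem_cons_of_mem _ he)
    cases t with
    | nil => simp [List.cons_prefix_cons, ha]
    | cons c t' =>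
      have ht' : '-' ∉ t' := fun he => ht (List.mem_cons_of_mem _ he)
      simp [List.cons_prefix_cons, ih t' hq' ht']

lemma dash_suffix_iff (r t rest : List Char) (hr : '-' ∉ r) (hrest : '-' ∉ rest) :
    (('-' :: r) <:+ (t ++ '-' :: rest)) ↔ r = rest := by
  rw [← List.reverse_prefix]
  have h1 : ('-' :: r).reverse = r.reverse ++ ['-'] := by simp
  have h2 : (t ++ '-' :: rest).reverse = rest.reverse ++ '-' :: t.reverse := by simp
  rw [h1, h2, dash_prefix_iff r.reverse rest.reverse t.reverse (by simpa using hr) (by simpa using hrest)]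
  exact ⟨fun h => by simpa using congrArg List.reverse h, fun h => by rw [h]⟩

lemma exists_first_dash (cs : List Char) (h : '-' ∈ cs) :
    ∃ t rest, cs = t ++ '-' :: rest ∧ '-' ∉ t := by
  induction cs with
  | nil => cases h
  | cons c cs' ih =>
    by_cases hc : c = '-'
    · exact ⟨[], cs', by simp [hc], by simp⟩
    · have h' : '-' ∈ cs' := by
        rcases List.mem_cons.mp h with he | hm
        · exact absurd he.symm hc
        · exact hm
      obtain ⟨t, rest, he, ht⟩ := ih h'
      exact ⟨c :: t, rest, by simp [he], by
        simp only [List.mem_cons, not_or]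
        exact ⟨fun he2 => hc he2.symm, ht⟩⟩

lemma exists_last_dash (cs : List Char) (h : '-' ∈ cs) :
    ∃ t rest, cs = t ++ '-' :: rest ∧ '-' ∉ rest := by
  obtain ⟨t, rest, he, ht⟩ := exists_first_dash cs.reverse (by simpa using h)
  refine ⟨rest.reverse, t.reverse, ?_, by simpa using ht⟩
  have := congrArg List.reverse he
  simpa using this

lemma find_go_dash (t rest : List Char) (ht : '-' ∉ t) (k : Nat) :
    PySem.Chars.find.go ['-'] (t ++ '-' :: rest) k = (k : Int) + t.length := by
  induction t generalizing k with
  | nil => simp [PySem.Chars.find.go, List.isPrefixOf]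
  | cons c t' ih =>
    have hc : ('-' : Char) ≠ c := fun he => ht (by simp [← he])
    have ht' : '-' ∉ t' := fun he => ht (List.mem_cons_of_mem _ he)
    have := ih ht' (k + 1)
    simp only [List.cons_append]
    rw [show PySem.Chars.find.go ['-'] (c :: (t' ++ '-' :: rest)) k
          = PySem.Chars.find.go ['-'] (t' ++ '-' :: rest) (k + 1) by
        simp [PySem.Chars.find.go, List.isPrefixOf, hc], this]
    push_cast [List.length_cons]
    ring

lemma find_first_dash (t rest : List Char) (ht : '-' ∉ t) :
    PySem.Chars.find (t ++ '-' :: rest) ['-'] = (t.length : Int) := by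
  have := find_go_dash t rest ht 0
  simpa [PySem.Chars.find] using this

lemma not_prefixOf_dash (xs : List Char) (h : '-' ∉ xs) :
    List.isPrefixOf ['-'] xs = false := by
  cases xs with
  | nil => rfl
  | cons c cs =>
    have hc : ('-' : Char) ≠ c := fun he => h (by simp [← he])
    simp [List.isPrefixOf, hc]

lemma rfind_go_dash (t rest : List Char) (hr : '-' ∉ rest) (k : Nat)
    (h1 : t.length ≤ k) :
    PySem.Chars.rfind.go (t ++ '-' :: rest) ['-'] k = (t.length : Int) := by
  induction k with
  | zero =>
    have ht0 : t = [] := List.length_eq_zero_iff.mp (Nat.le_zero.mp h1)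
    subst ht0
    simp [PySem.Chars.rfind.go, List.isPrefixOf]
  | succ j ih =>
    by_cases he : t.length = j + 1
    · have hdrop : List.drop (j + 1) (t ++ '-' :: rest) = '-' :: rest := by
        rw [← he]; exact List.drop_left
      simp [PySem.Chars.rfind.go, hdrop, List.isPrefixOf, he]
    · have hle : t.length ≤ j := Nat.lt_succ_iff.mp (Nat.lt_of_le_of_ne h1 he)
      have hdrop : List.drop (j + 1) (t ++ '-' :: rest)
          = List.drop (j + 1 - t.length) ('-' :: rest) := by
        simp [List.drop_append, (by omega : t.length ≤ j + 1)]
      have hnod : '-' ∉ List.drop (j + 1) (t ++ '-' :: rest) := by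
        rw [hdrop]
        intro hm
        have hpos : 0 < j + 1 - t.length := by omega
        rcases Nat.exists_eq_add_of_lt hpos with ⟨m, hm'⟩
        rw [show j + 1 - t.length = m + 1 by omega] at hm
        exact hr (List.mem_of_mem_drop (by simpa using hm))
      have hfalse := not_prefixOf_dash _ hnod
      simp only [PySem.Chars.rfind.go, hfalse]
      exact ih hle

lemma rfind_last_dash (t rest : List Char) (hr : '-' ∉ rest) :
    PySem.Chars.rfind (t ++ '-' :: rest) ['-'] = (t.length : Int) := by
  have := rfind_go_dash t rest hr (t ++ '-' :: rest).length (by simp)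
  simpa [PySem.Chars.rfind] using this

lemma aPrefixLoop_none (cs : List Char) (h : '-' ∉ cs) (PS : List String)
    (hPS : ∀ p ∈ PS, '-' ∈ p.toList) : aPrefixLoop cs PS = none := by
  induction PS with
  | nil => rfl
  | cons p ps ih =>
    have hs : PySem.Chars.startswith cs p.toList = false := by
      cases hb : PySem.Chars.startswith cs p.toList with
      | false => rfl
      | true =>
        exact absurd (((PySem.Chars.startswith_iff cs p.toList).mp hb).subset
          (hPS p (by simp))) h
    simp [aPrefixLoop, hs, ih (fun p hp => hPS p (List.mem_cons_of_mem _ hp))]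

lemma aSuffixLoop_none (cs : List Char) (h : '-' ∉ cs) (SS : List String)
    (hSS : ∀ s ∈ SS, '-' ∈ s.toList) : aSuffixLoop cs SS = none := by
  induction SS with
  | nil => rfl
  | cons s ss ih =>
    have hs : PySem.Chars.endswith cs s.toList = false := by
      cases hb : PySem.Chars.endswith cs s.toList with
      | false => rfl
      | true =>
        exact absurd (((PySem.Chars.endswith_iff cs s.toList).mp hb).subset
          (hSS s (by simp))) h
    simp [aSuffixLoop, hs, ih (fun s hp => hSS s (List.mem_cons_of_mem _ hp))]

lemma aPrefixLoop_eq (t rest : List Char) (ht : '-' ∉ t) (PS : List String)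
    (hPS : ∀ p ∈ PS, '-' ∉ p.toList.dropLast ∧ p.toList = p.toList.dropLast ++ ['-']) :
    aPrefixLoop (t ++ '-' :: rest) PS =
      if (t ++ ['-']) ∈ PS.map String.toList ∧ 2 < rest.length
      then some (pyStartMsg (t ++ ['-'])) else none := by
  induction PS with
  | nil => simp [aPrefixLoop]
  | cons p ps ih =>
    obtain ⟨hq, hpe⟩ := hPS p (by simp)
    have ih' := ih (fun p hp => hPS p (List.mem_cons_of_mem _ hp))
    have hpre : PySem.Chars.startswith (t ++ '-' :: rest) p.toList = true ↔ p.toList.dropLast = t := by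
      rw [PySem.Chars.startswith_iff]
      conv_lhs => rw [hpe]
      exact dash_prefix_iff _ t rest hq ht
    by_cases hqt : p.toList.dropLast = t
    · have hp' : p.toList = t ++ ['-'] := by rw [hpe, hqt]
      have hs : PySem.Chars.startswith (t ++ '-' :: rest) p.toList = true := hpre.mpr hqt
      have hrem : PySem.Chars.slice (t ++ '-' :: rest) (some (p.toList.length : Int)) none = rest := by
        rw [PySem.Chars.slice, PySem.List.slice_from _ (by positivity)]
        rw [show ((p.toList.length : Int)).toNat = t.length + 1 by rw [hp']; simp]
        rw [show t ++ '-' :: rest = (t ++ ['-']) ++ rest by simp]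
        exact List.drop_left' (by simp)
      by_cases hrl : 2 < rest.length
      · have hmem : (t ++ ['-']) ∈ (p :: ps).map String.toList := by
          simp only [List.map_cons, List.mem_cons]
          exact Or.inl hp'.symm
        have hnil : rest ≠ [] := by intro hn; rw [hn] at hrl; simp at hrl
        simp only [aPrefixLoop, hs, if_true, hrem]
        rw [if_pos ⟨hnil, hrl⟩, if_pos ⟨hmem, hrl⟩, hp']
      · have hcond : ¬(rest ≠ [] ∧ 2 < rest.length) := fun ⟨_, h2⟩ => hrl h2
        simp only [aPrefixLoop, hs, if_true, hrem, if_neg hcond]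
        rw [ih']
        rw [if_neg (fun ⟨_, h2⟩ => hrl h2), if_neg (fun ⟨_, h2⟩ => hrl h2)]
    · have hs : PySem.Chars.startswith (t ++ '-' :: rest) p.toList = false := by
        cases hb : PySem.Chars.startswith (t ++ '-' :: rest) p.toList with
        | false => rfl
        | true => exact absurd (hpre.mp hb) hqt
      have hne : (t ++ ['-']) ≠ p.toList := by
        rw [hpe]
        intro hcontra
        exact hqt ((List.append_left_inj _).mp hcontra).symm
      have hiff : ((t ++ ['-']) ∈ (p :: ps).map String.toList ∧ 2 < rest.length)
          ↔ ((t ++ ['-']) ∈ ps.map String.toList ∧ 2 < rest.length) := by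
        simp only [List.map_cons, List.mem_cons]
        constructor
        · rintro ⟨hm | hm, h2⟩
          · exact absurd hm hne
          · exact ⟨hm, h2⟩
        · rintro ⟨hm, h2⟩; exact ⟨Or.inr hm, h2⟩
      simp only [aPrefixLoop, hs, if_false, Bool.false_eq_true]
      rw [ih']
      exact if_congr hiff.symm rfl rfl

lemma aSuffixLoop_eq (t rest : List Char) (hrest : '-' ∉ rest) (SS : List String)
    (hSS : ∀ s ∈ SS, s.toList.head? = some '-' ∧ '-' ∉ s.toList.tail) :
    aSuffixLoop (t ++ '-' :: rest) SS =
      if ('-' :: rest) ∈ SS.map String.toList ∧ 2 < t.length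
      then some (pyEndMsg ('-' :: rest)) else none := by
  induction SS with
  | nil => simp [aSuffixLoop]
  | cons s ss ih =>
    obtain ⟨hh, htl⟩ := hSS s (by simp)
    have hse : s.toList = '-' :: s.toList.tail := by
      cases hc : s.toList with
      | nil => rw [hc] at hh; cases hh
      | cons c cs => rw [hc] at hh; simp at hh; simp [hh]
    have ih' := ih (fun s hp => hSS s (List.mem_cons_of_mem _ hp))
    have hend : PySem.Chars.endswith (t ++ '-' :: rest) s.toList = true ↔ s.toList.tail = rest := by
      rw [PySem.Chars.endswith_iff]
      conv_lhs => rw [hse]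
      exact dash_suffix_iff _ t rest htl hrest
    by_cases hqt : s.toList.tail = rest
    · have hs' : s.toList = '-' :: rest := by rw [hse, hqt]
      have hsw : PySem.Chars.endswith (t ++ '-' :: rest) s.toList = true := hend.mpr hqt
      have hlen : s.toList.length = rest.length + 1 := by rw [hs']; simp
      have hrem : PySem.Chars.slice (t ++ '-' :: rest) none (some (-(s.toList.length : Int))) = t := by
        rw [PySem.Chars.slice, PySem.List.slice_to_neg_natCast _ s.toList.length (by omega)]
        rw [show (t ++ '-' :: rest).length - s.toList.length = t.length by
          simp [hlen]]
        exact List.take_left' rfl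
      by_cases hrl : 2 < t.length
      · have hmem : ('-' :: rest) ∈ (s :: ss).map String.toList := by
          simp only [List.map_cons, List.mem_cons]
          exact Or.inl hs'.symm
        have hnil : t ≠ [] := by intro hn; rw [hn] at hrl; simp at hrl
        simp only [aSuffixLoop, hsw, if_true, hrem]
        rw [if_pos ⟨hnil, hrl⟩, if_pos ⟨hmem, hrl⟩, hs']
      · have hcond : ¬(t ≠ [] ∧ 2 < t.length) := fun ⟨_, h2⟩ => hrl h2
        simp only [aSuffixLoop, hsw, if_true, hrem, if_neg hcond]
        rw [ih']
        rw [if_neg (fun h => hrl h.2), if_neg (fun h => hrl h.2)]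
    · have hsw : PySem.Chars.endswith (t ++ '-' :: rest) s.toList = false := by
        cases hb : PySem.Chars.endswith (t ++ '-' :: rest) s.toList with
        | false => rfl
        | true => exact absurd (hend.mp hb) hqt
      have hne : ('-' :: rest) ≠ s.toList := by
        rw [hse]
        intro hcontra
        exact hqt (by injection hcontra with _ h2; exact h2.symm)
      have hiff : (('-' :: rest) ∈ (s :: ss).map String.toList ∧ 2 < t.length)
          ↔ (('-' :: rest) ∈ ss.map String.toList ∧ 2 < t.length) := by
        simp only [List.map_cons, List.mem_cons]
        constructor
        · rintro ⟨hm | hm, h2⟩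
          · exact absurd hm hne
          · exact ⟨hm, h2⟩
        · rintro ⟨hm, h2⟩; exact ⟨Or.inr hm, h2⟩
      simp only [aSuffixLoop, hsw, if_false, Bool.false_eq_true]
      rw [ih']
      exact if_congr hiff.symm rfl rfl

lemma pyHalPrefixes_shape :
    ∀ p ∈ pyHalPrefixes, '-' ∉ p.toList.dropLast ∧ p.toList = p.toList.dropLast ++ ['-'] := by decide

lemma pyHalSuffixes_shape :
    ∀ s ∈ pyHalSuffixes, s.toList.head? = some '-' ∧ '-' ∉ s.toList.tail := by decide

lemma pyHalPrefixes_dash : ∀ p ∈ pyHalPrefixes, '-' ∈ p.toList := by decide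

lemma pyHalSuffixes_dash : ∀ s ∈ pyHalSuffixes, '-' ∈ s.toList := by decide

lemma core_eq (cs : List Char) :
    (match aPrefixLoop cs pyHalPrefixes with
     | some m => some m
     | none => aSuffixLoop cs pyHalSuffixes) =
    (let i := PySem.Chars.find cs ['-']
     if i = -1 then none
     else
       let pre := PySem.Chars.slice cs none (some (i + 1))
       if PySem.Set.contains pyHalPrefixSet pre ∧ 2 < (cs.length : Int) - (i + 1) then
         some (pyStartMsg pre)
       else
         let j := PySem.Chars.rfind cs ['-']
         let suf := PySem.Chars.slice cs (some j) none
         if PySem.Set.contains pyHalSuffixSet suf ∧ 2 < j then some (pyEndMsg suf)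
         else none) := by
  by_cases hd : '-' ∈ cs
  · obtain ⟨t, rest, rfl, ht⟩ := exists_first_dash cs hd
    have hf : PySem.Chars.find (t ++ '-' :: rest) ['-'] = (t.length : Int) :=
      find_first_dash t rest ht
    have hpre : PySem.Chars.slice (t ++ '-' :: rest) none (some ((t.length : Int) + 1))
        = t ++ ['-'] := by
      rw [PySem.Chars.slice, PySem.List.slice_to _ (by positivity)]
      rw [show ((t.length : Int) + 1).toNat = t.length + 1 by omega]
      rw [show t ++ '-' :: rest = (t ++ ['-']) ++ rest by simp]
      exact List.take_left' (by simp)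
    have hContains : (PySem.Set.contains pyHalPrefixSet (t ++ ['-']) = true)
        ↔ (t ++ ['-']) ∈ pyHalPrefixes.map String.toList := by
      rw [PySem.Set.contains_iff, pyHalPrefixSet, PySem.Set.mem_ofList]
    have harith : (2 < ((t ++ '-' :: rest).length : Int) - ((t.length : Int) + 1))
        ↔ 2 < rest.length := by
      simp only [List.length_append, List.length_cons]
      push_cast
      omega
    rw [aPrefixLoop_eq t rest ht _ pyHalPrefixes_shape]
    simp only [hf, if_neg (show ¬((t.length : Int) = -1) by omega), hpre]
    by_cases hc1 : (t ++ ['-']) ∈ pyHalPrefixes.map String.toList ∧ 2 < rest.length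
    · rw [if_pos hc1]
      rw [if_pos ⟨hContains.mpr hc1.1, harith.mpr hc1.2⟩]
    · rw [if_neg hc1]
      rw [if_neg (fun h => hc1 ⟨hContains.mp h.1, harith.mp h.2⟩)]
      obtain ⟨t2, r2, he2, hr2⟩ := exists_last_dash (t ++ '-' :: rest) hd
      have hrf : PySem.Chars.rfind (t ++ '-' :: rest) ['-'] = (t2.length : Int) := by
        rw [he2]; exact rfind_last_dash t2 r2 hr2
      have hsuf : PySem.Chars.slice (t ++ '-' :: rest) (some ((t2.length : Int))) none
          = '-' :: r2 := by
        rw [PySem.Chars.slice, PySem.List.slice_from _ (by positivity), Int.toNat_natCast, he2]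
        exact List.drop_left
      have hContains2 : (PySem.Set.contains pyHalSuffixSet ('-' :: r2) = true)
          ↔ ('-' :: r2) ∈ pyHalSuffixes.map String.toList := by
        rw [PySem.Set.contains_iff, pyHalSuffixSet, PySem.Set.mem_ofList]
      have harith2 : (2 < (t2.length : Int)) ↔ 2 < t2.length := by omega
      have hA : aSuffixLoop (t ++ '-' :: rest) pyHalSuffixes =
          if ('-' :: r2) ∈ pyHalSuffixes.map String.toList ∧ 2 < t2.length
          then some (pyEndMsg ('-' :: r2)) else none := by
        rw [he2]
        exact aSuffixLoop_eq t2 r2 hr2 _ pyHalSuffixes_shape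
      rw [hA]
      simp only [hrf, hsuf]
      exact if_congr (by rw [hContains2, harith2]) rfl rfl
  · have hf : PySem.Chars.find cs ['-'] = -1 :=
      (PySem.Chars.find_eq_neg_one_iff _ _).mpr (fun hinf => hd (hinf.subset (by simp)))
    rw [aPrefixLoop_none cs hd _ pyHalPrefixes_dash]
    rw [aSuffixLoop_none cs hd _ pyHalSuffixes_dash]
    simp [hf]

-- ===== VERDICT (by name: the statement is the Claim_ definition above) =====
theorem check_hallucination_pattern_py_spec : Claim_equal_check_hallucination_pattern_py := by
  intro name _
  unfold Spec_check_hallucination_pattern_py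
  unfold check_hallucination_pattern_py check_hallucination_pattern_py_alt
  exact core_eq (PySem.Chars.lower name.toList)
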